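-- pv_equiv track=rewrite | github.com/wnsgur1/algorithm | 프로그래머스/2/389480. 완전범죄/완전범죄.py | solution
-- ===== SOURCE A (Python) =====
-- def solution(info, n, m):
--     from collections import defaultdict
--     INF = float('inf')
--     length = len(info)
--
--
--     dp = [defaultdict(lambda: INF) for _ in range(length + 1)]
--     dp[0][0] = 0
--
--     for i in range(length):
--         a_tr, b_tr = info[i]
--         for b_trace, a_trace in dp[i].items():
--
--             na = a_trace + a_tr
--             nb = b_trace
--             if na < n:
--                 dp[i + 1][nb] = min(dp[i + 1][nb], na)
--
--
--             na = a_trace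
--             nb = b_trace + b_tr
--             if nb < m:
--                 dp[i + 1][nb] = min(dp[i + 1][nb], na)
--
--
--     result = min([a for b, a in dp[length].items() if b < m and a < n], default=INF)
--
--     return result if result != INF else -1
-- ===== SOURCE B (Python) =====
-- def solution(info, n, m):
--     def solve(i, a_acc, b_acc):
--         if i == len(info):
--             return a_acc if a_acc < n and b_acc < m else None
--         a_tr, b_tr = info[i]
--         best = None
--         if a_acc + a_tr < n:
--             r = solve(i + 1, a_acc + a_tr, b_acc)
--             if r is not None and (best is None or r < best):
--                 best = r
--         if b_acc + b_tr < m: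
--             r = solve(i + 1, a_acc, b_acc + b_tr)
--             if r is not None and (best is None or r < best):
--                 best = r
--         return best
--
--     r = solve(0, 0, 0)
--     return -1 if r is None else r
-- ===== Notes on version B (the rewrite author's own statement) =====
-- stated objective: simpler
-- what changed: Replaced the bottom-up per-level defaultdict DP table with a direct recursion over the item list that carries the two accumulated traces and takes the min over valid assignments.
import Mathlib
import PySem

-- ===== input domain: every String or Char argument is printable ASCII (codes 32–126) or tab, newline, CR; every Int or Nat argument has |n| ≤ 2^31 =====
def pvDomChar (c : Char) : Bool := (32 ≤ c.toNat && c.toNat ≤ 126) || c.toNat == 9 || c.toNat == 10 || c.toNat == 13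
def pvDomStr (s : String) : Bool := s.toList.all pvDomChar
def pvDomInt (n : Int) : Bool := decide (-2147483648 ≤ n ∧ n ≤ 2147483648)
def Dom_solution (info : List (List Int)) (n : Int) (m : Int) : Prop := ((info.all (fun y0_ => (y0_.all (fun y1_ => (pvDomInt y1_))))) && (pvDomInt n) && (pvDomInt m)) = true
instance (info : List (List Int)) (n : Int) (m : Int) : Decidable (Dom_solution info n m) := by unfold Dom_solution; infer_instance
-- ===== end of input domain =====

-- B replaces A's bottom-up per-level defaultdict DP with a direct recursion over the items
-- carrying the two accumulated traces (objective: simpler).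

-- ===== PORT A =====
-- 'a_tr, b_tr = info[i]' (raises unless the item has exactly 2 elements; Pre_ excludes others)
def pvPairA : List Int → Int × Int
  | [a, b] => (a, b)
  | _ => (0, 0)

-- min(dp[i+1][nb], na) where a missing key reads as INF (none models INF, which is never stored)
def pvMinD (o : Option Int) (v : Int) : Int :=
  match o with
  | none => v
  | some w => min w v

-- dp[i+1][nb] = min(dp[i+1][nb], na)
def pvUpdA (d : PySem.Dict Int Int) (k v : Int) : PySem.Dict Int Int :=
  d.insert k (pvMinD (d.get? k) v)

-- body of 'for b_trace, a_trace in dp[i].items()' (p = (b_trace, a_trace))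
def pvEntry (n m a_tr b_tr : Int) (dn : PySem.Dict Int Int) (p : Int × Int) : PySem.Dict Int Int :=
  let dn' := if p.2 + a_tr < n then pvUpdA dn p.1 (p.2 + a_tr) else dn
  if p.1 + b_tr < m then pvUpdA dn' (p.1 + b_tr) p.2 else dn'

-- one iteration of 'for i in range(length)': builds dp[i+1] from dp[i]
def pvStepA (n m : Int) (item : List Int) (d : PySem.Dict Int Int) : PySem.Dict Int Int :=
  let ab := pvPairA item
  d.items.foldl (pvEntry n m ab.1 ab.2) PySem.Dict.empty

def solution (info : List (List Int)) (n : Int) (m : Int) : Int :=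
  let final := info.foldl (fun d item => pvStepA n m item d) (PySem.Dict.empty.insert 0 0)
  match PySem.List.min? ((final.items.filter (fun p => p.1 < m && p.2 < n)).map (·.2)) (fun x => x) with
  | none => -1       -- result == INF
  | some v => v

-- ===== PORT B =====
-- 'a_tr, b_tr = info[i]' (raises unless the item has exactly 2 elements; Pre_ excludes others)
def pvPairB : List Int → Int × Int
  | [a, b] => (a, b)
  | _ => (0, 0)

-- the 'if r is not None and (best is None or r < best): best = r' update
def pvOmin : Option Int → Option Int → Option Int
  | none, y => y
  | some x, none => some x
  | some x, some y => some (min x y)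

-- solve(i, a_acc, b_acc), recursing on the remaining suffix of info
def pvSolveB (n m : Int) : List (List Int) → Int → Int → Option Int
  | [], a, b => if a < n ∧ b < m then some a else none
  | it :: rest, a, b =>
    let ab := pvPairB it
    let best := if a + ab.1 < n then pvOmin none (pvSolveB n m rest (a + ab.1) b) else none
    if b + ab.2 < m then pvOmin best (pvSolveB n m rest a (b + ab.2)) else best

def solution_alt (info : List (List Int)) (n : Int) (m : Int) : Int :=
  match pvSolveB n m info 0 0 with
  | none => -1
  | some v => v

-- ===== PRECONDITION & SPEC =====
-- Pre_ excludes exactly the inputs where A raises: 'a_tr, b_tr = info[i]' is a ValueError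
-- unless every item of info has exactly 2 elements.
def Pre_solution (info : List (List Int)) (n : Int) (m : Int) : Prop :=
  ∀ item ∈ info, item.length = 2
instance (info : List (List Int)) (n : Int) (m : Int) : Decidable (Pre_solution info n m) := by
  unfold Pre_solution; infer_instance

def pvWitness_solution : List (List Int) × Int × Int := ([[1, 2], [2, 1]], 3, 3)

def Spec_solution (info : List (List Int)) (n : Int) (m : Int) (out : Int) : Prop := out = solution_alt info n m
instance (info : List (List Int)) (n : Int) (m : Int) (out : Int) : Decidable (Spec_solution info n m out) := by unfold Spec_solution; infer_instance

-- ===== CLAIM (what is proved, stated in full; the proofs are below) =====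
def Claim_equal_solution : Prop := ∀ (info : List (List Int)) (n : Int) (m : Int), Dom_solution info n m → Pre_solution info n m → Spec_solution info n m (solution info n m)

-- ===== LEMMAS AND PROOFS =====

theorem pvPair_eq (it : List Int) : pvPairA it = pvPairB it := by
  rcases it with _ | ⟨a, _ | ⟨b, t⟩⟩ <;> rfl

-- the minimum carried by A over one dp level, evaluated through B's recursion on the suffix
def pvBest (n m : Int) (rest : List (List Int)) (l : List (Int × Int)) : Option Int :=
  l.foldl (fun acc p => pvOmin acc (pvSolveB n m rest p.2 p.1)) none

theorem pvOmin_none_right (x : Option Int) : pvOmin x none = x := by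
  cases x <;> rfl

theorem pvOmin_none_left (y : Option Int) : pvOmin none y = y := rfl

theorem pvOmin_assoc (x y z : Option Int) : pvOmin (pvOmin x y) z = pvOmin x (pvOmin y z) := by
  cases x <;> cases y <;> cases z <;> simp [pvOmin, min_assoc]

theorem pvOmin_comm (x y : Option Int) : pvOmin x y = pvOmin y x := by
  cases x <;> cases y <;> simp [pvOmin, min_comm]

theorem pvOmin_right_comm (x y z : Option Int) : pvOmin (pvOmin x y) z = pvOmin (pvOmin x z) y := by
  rw [pvOmin_assoc, pvOmin_assoc, pvOmin_comm y z]

theorem pvOmin_glue {p p' q q' : Option Int} (hp : pvOmin p p' = p) (hq : pvOmin q q' = q) :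
    pvOmin (pvOmin p q) (pvOmin p' q') = pvOmin p q := by
  calc pvOmin (pvOmin p q) (pvOmin p' q')
      = pvOmin (pvOmin (pvOmin p q) p') q' := (pvOmin_assoc _ _ _).symm
    _ = pvOmin (pvOmin (pvOmin p p') q) q' := by rw [pvOmin_right_comm p q p']
    _ = pvOmin (pvOmin p q) q' := by rw [hp]
    _ = pvOmin p (pvOmin q q') := pvOmin_assoc _ _ _
    _ = pvOmin p q := by rw [hq]

theorem pvFoldl_omin_factor {α : Type} (f : α → Option Int) (l : List α) (acc : Option Int) :
    l.foldl (fun a p => pvOmin a (f p)) acc = pvOmin acc (l.foldl (fun a p => pvOmin a (f p)) none) := by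
  induction l generalizing acc with
  | nil => simp [pvOmin_none_right]
  | cons p l ih =>
    simp only [List.foldl_cons]
    rw [ih (pvOmin acc (f p)), ih (pvOmin none (f p)), pvOmin_none_left, pvOmin_assoc]

theorem pvBest_nil (n m : Int) (rest : List (List Int)) : pvBest n m rest [] = none := rfl

theorem pvBest_cons (n m : Int) (rest : List (List Int)) (p : Int × Int) (l : List (Int × Int)) :
    pvBest n m rest (p :: l) = pvOmin (pvSolveB n m rest p.2 p.1) (pvBest n m rest l) := by
  unfold pvBest
  simp only [List.foldl_cons]
  rw [pvFoldl_omin_factor, pvOmin_none_left]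

theorem pvBest_append (n m : Int) (rest : List (List Int)) (u w : List (Int × Int)) :
    pvBest n m rest (u ++ w) = pvOmin (pvBest n m rest u) (pvBest n m rest w) := by
  unfold pvBest
  rw [List.foldl_append, pvFoldl_omin_factor]

-- B's step on a cons is exactly the omin of the two conditional moves
theorem pvSolveB_cons (n m : Int) (it : List Int) (rest : List (List Int)) (a b : Int) :
    pvSolveB n m (it :: rest) a b
      = pvOmin (if a + (pvPairB it).1 < n then pvSolveB n m rest (a + (pvPairB it).1) b else none)
               (if b + (pvPairB it).2 < m then pvSolveB n m rest a (b + (pvPairB it).2) else none) := by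
  simp only [pvSolveB]
  split_ifs with h1 h2 h2 <;> simp [pvOmin_none_left, pvOmin_none_right]

-- dominance: a smaller running A-trace always yields a result at least as good
theorem pvSolveB_mono (n m : Int) (rest : List (List Int)) (a a' b : Int) (h : a ≤ a') :
    pvOmin (pvSolveB n m rest a b) (pvSolveB n m rest a' b) = pvSolveB n m rest a b := by
  induction rest generalizing a a' b with
  | nil =>
    simp only [pvSolveB]
    split_ifs with h1 h2 h2 <;> simp [pvOmin] <;> omega
  | cons it rest ih =>
    simp only [pvSolveB_cons]
    apply pvOmin_glue
    · split_ifs with h1 h2 h2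
      · exact ih _ _ _ (by omega)
      · exact pvOmin_none_right _
      · omega
      · rfl
    · split_ifs with h1
      · exact ih _ _ _ h
      · rfl

theorem pvSolveB_min (n m : Int) (rest : List (List Int)) (a a' b : Int) :
    pvSolveB n m rest (min a a') b = pvOmin (pvSolveB n m rest a b) (pvSolveB n m rest a' b) := by
  rcases le_total a a' with h | h
  · rw [min_eq_left h, pvSolveB_mono n m rest a a' b h]
  · rw [min_eq_right h, pvOmin_comm, pvSolveB_mono n m rest a' a b h]

theorem pvUpdA_nodup (d : PySem.Dict Int Int) (k v : Int) (h : d.keys.Nodup) :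
    (pvUpdA d k v).keys.Nodup := PySem.Dict.nodup_keys_insert _ _ _ h

theorem pvEntry_nodup (n m a_tr b_tr : Int) (dn : PySem.Dict Int Int) (p : Int × Int)
    (h : dn.keys.Nodup) : (pvEntry n m a_tr b_tr dn p).keys.Nodup := by
  unfold pvEntry
  split_ifs <;> first
    | exact pvUpdA_nodup _ _ _ (pvUpdA_nodup _ _ _ h)
    | exact pvUpdA_nodup _ _ _ h
    | exact h

-- one dp[i+1][k] = min(dp[i+1][k], v) update adds one omin-contribution
theorem pvBest_upd (n m : Int) (rest : List (List Int)) (e : PySem.Dict Int Int)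
    (hnd : e.keys.Nodup) (k v : Int) :
    pvBest n m rest (pvUpdA e k v).items
      = pvOmin (pvBest n m rest e.items) (pvSolveB n m rest v k) := by
  unfold pvUpdA
  cases hg : e.get? k with
  | none =>
    have hc : e.contains k = false := by
      rw [PySem.Dict.contains_eq_isSome_get?, hg]; rfl
    rw [PySem.Dict.items_insert_of_not_contains _ _ hc]
    rw [pvBest_append]
    simp [pvBest_cons, pvBest_nil, pvOmin_none_right, pvMinD]
  | some w =>
    have hc : e.contains k = true := by
      rw [PySem.Dict.contains_eq_isSome_get?, hg]; rfl
    rw [PySem.Dict.items_insert_of_contains _ _ hc]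
    have hmem : (k, w) ∈ e.items := PySem.Dict.mem_items_of_get?_eq_some _ hg
    obtain ⟨xs, ys, hsplit⟩ := List.append_of_mem hmem
    have hkeys : e.keys = (xs ++ (k, w) :: ys).map Prod.fst := by
      simp only [PySem.Dict.keys, hsplit]
    have hnd' : ((xs ++ (k, w) :: ys).map Prod.fst).Nodup := by rw [← hkeys]; exact hnd
    rw [List.map_append, List.map_cons, List.nodup_append] at hnd'
    have hxs : ∀ p ∈ xs, p.1 ≠ k := by
      intro p hp hpk
      have hm : p.1 ∈ xs.map Prod.fst := List.mem_map_of_mem hp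
      rw [hpk] at hm
      exact hnd'.2.2 k hm k List.mem_cons_self rfl
    have hys : ∀ p ∈ ys, p.1 ≠ k := by
      intro p hp hpk
      have hm : p.1 ∈ ys.map Prod.fst := List.mem_map_of_mem hp
      rw [hpk] at hm
      exact ((List.nodup_cons.mp hnd'.2.1).1 hm).elim
    have hmap : (e.items.map (fun p => if p.1 == k then (k, pvMinD (some w) v) else p))
        = xs ++ (k, pvMinD (some w) v) :: ys := by
      rw [hsplit, List.map_append, List.map_cons]
      congr 1
      · calc xs.map (fun p => if p.1 == k then (k, pvMinD (some w) v) else p)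
            = xs.map id := List.map_congr_left (fun p hp => by simp [hxs p hp])
          _ = xs := List.map_id xs
      · congr 1
        · simp
        · calc ys.map (fun p => if p.1 == k then (k, pvMinD (some w) v) else p)
              = ys.map id := List.map_congr_left (fun p hp => by simp [hys p hp])
            _ = ys := List.map_id ys
    rw [hmap, hsplit]
    rw [pvBest_append, pvBest_append, pvBest_cons, pvBest_cons]
    simp only [pvMinD]
    rw [pvSolveB_min,
      pvOmin_right_comm (pvSolveB n m rest w k) (pvSolveB n m rest v k) (pvBest n m rest ys),
      ← pvOmin_assoc]

-- processing one (b_trace, a_trace) entry contributes its two conditional moves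
theorem pvBest_entry (n m a_tr b_tr : Int) (rest : List (List Int)) (e : PySem.Dict Int Int)
    (hnd : e.keys.Nodup) (p : Int × Int) :
    pvBest n m rest (pvEntry n m a_tr b_tr e p).items
      = pvOmin (pvBest n m rest e.items)
          (pvOmin (if p.2 + a_tr < n then pvSolveB n m rest (p.2 + a_tr) p.1 else none)
                  (if p.1 + b_tr < m then pvSolveB n m rest p.2 (p.1 + b_tr) else none)) := by
  unfold pvEntry
  split_ifs with h1 h2 h2
  · rw [pvBest_upd n m rest _ (pvUpdA_nodup _ _ _ hnd), pvBest_upd n m rest _ hnd, pvOmin_assoc]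
  · rw [pvBest_upd n m rest _ hnd, pvOmin_none_right]
  · rw [pvBest_upd n m rest _ hnd, pvOmin_none_left]
  · rw [pvOmin_none_right, pvOmin_none_right]

theorem pvBest_foldl_entry (n m a_tr b_tr : Int) (rest : List (List Int)) (L : List (Int × Int))
    (e : PySem.Dict Int Int) (hnd : e.keys.Nodup) :
    pvBest n m rest ((L.foldl (pvEntry n m a_tr b_tr) e)).items
      = pvOmin (pvBest n m rest e.items)
          (L.foldl (fun acc p => pvOmin acc
            (pvOmin (if p.2 + a_tr < n then pvSolveB n m rest (p.2 + a_tr) p.1 else none)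
                    (if p.1 + b_tr < m then pvSolveB n m rest p.2 (p.1 + b_tr) else none))) none) := by
  induction L generalizing e with
  | nil => simp [pvOmin_none_right]
  | cons p L ih =>
    simp only [List.foldl_cons]
    rw [ih _ (pvEntry_nodup _ _ _ _ _ _ hnd), pvBest_entry n m a_tr b_tr rest e hnd p,
      pvFoldl_omin_factor]
    conv_rhs => rw [pvFoldl_omin_factor]
    rw [pvOmin_assoc]
    simp only [pvOmin_none_left]

-- the invariant: one dp level of A advances B's recursion by one item
theorem pvBest_step (n m : Int) (item : List Int) (rest : List (List Int))
    (d : PySem.Dict Int Int) :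
    pvBest n m rest (pvStepA n m item d).items = pvBest n m (item :: rest) d.items := by
  unfold pvStepA
  rw [pvBest_foldl_entry _ _ _ _ _ _ _ (by decide)]
  have hempty : pvBest n m rest (PySem.Dict.empty : PySem.Dict Int Int).items = none := rfl
  rw [hempty, pvOmin_none_left, pvPair_eq]
  unfold pvBest
  simp only [pvSolveB_cons]

theorem pvBest_main (n m : Int) (L : List (List Int)) (d : PySem.Dict Int Int) :
    pvBest n m [] ((L.foldl (fun d it => pvStepA n m it d) d)).items = pvBest n m L d.items := by
  induction L generalizing d with
  | nil => rfl
  | cons it L ih =>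
    simp only [List.foldl_cons]
    rw [ih _, pvBest_step n m it L d]

theorem pvFoldl_min_init (t : List Int) (x y : Int) :
    t.foldl min (min x y) = min x (t.foldl min y) := by
  induction t generalizing y with
  | nil => rfl
  | cons z t ih =>
    simp only [List.foldl_cons]
    rw [min_assoc, ih]

theorem pvMin?_id_cons_omin (x : Int) (ys : List Int) :
    PySem.List.min? (x :: ys) (fun v => v) = pvOmin (some x) (PySem.List.min? ys (fun v => v)) := by
  cases ys with
  | nil => rfl
  | cons y t =>
    rw [PySem.List.min?_id_cons, PySem.List.min?_id_cons]
    simp only [List.foldl_cons, pvOmin]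
    rw [pvFoldl_min_init]

-- A's final 'min([a for b, a in dp[length].items() if b < m and a < n], default=INF)'
theorem pvBest_final (n m : Int) (l : List (Int × Int)) :
    PySem.List.min? ((l.filter (fun p => p.1 < m && p.2 < n)).map (·.2)) (fun x => x)
      = pvBest n m [] l := by
  induction l with
  | nil => rfl
  | cons p l ih =>
    rw [pvBest_cons]
    simp only [pvSolveB, List.filter_cons]
    by_cases h : p.2 < n ∧ p.1 < m
    · rw [if_pos h, if_pos (by simp [h.1, h.2])]
      rw [List.map_cons, pvMin?_id_cons_omin, ih]
    · rw [if_neg h, if_neg (by simp only [Bool.and_eq_true, decide_eq_true_eq]; tauto), ih]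
      rfl

-- ===== VERDICT (by name: the statement is the Claim_ definition above) =====
theorem solution_spec : Claim_equal_solution := by
  intro info n m _ _
  unfold Spec_solution
  simp only [solution, solution_alt]
  rw [pvBest_final, pvBest_main n m info _]
  have hitems : (PySem.Dict.empty.insert 0 0 : PySem.Dict Int Int).items = [(0, 0)] := rfl
  rw [hitems, pvBest_cons, pvBest_nil, pvOmin_none_right]
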